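-- pv_equiv track=rewrite | github.com/s2-t2/ada_lovelace_hackathon | app/ask_uppsala.py | ask_transport
-- ===== SOURCE A (Python) =====
-- def ask_transport(question):
--     info = "THIS QUESTION IS ABOUT TRANSPORT"
--
--     ##### QUESTIONS
--     # How much is the train to stockholm
--     keywords_q1 = ["how", "much", "train","trains", "stockholm","to"]
--     matches_q1 = 0
--
--     # How much is monthly subscription for UL card
--     keywords_q2 = ["ul", "card" "how", "monthly","subscription"]
--     matches_q2 = 0
--
--     # how far is arlanda airport
--     keywords_q3 = ["how","far","arlanda","airport"]
--     matches_q3 = 0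
--
--     # buses to polacksbacken
--     keywords_q4 = ["bus", "buses", "polacksbacken", "to"]
--     matches_q4 = 0
--
--     # are there student discounts for transportation
--     keywords_q5 = ["student", "discounts", "transportation", "are"]
--     matches_q5 = 0
--
--     for word in question:
--         for key in keywords_q1:
--             if word == key:
--                 matches_q1 += 1
--
--         for key in keywords_q2:
--             if word == key:
--                 matches_q2 += 1
--
--         for key in keywords_q3:
--             if word == key:
--                 matches_q3 += 1
--
--         for key in keywords_q4:
--             if word == key:
--                 matches_q4 += 1
--
--         for key in keywords_q5:
--             if word == key:
--                 matches_q5 += 1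
--
--     # ANSWERS
--
--     error_message = "Sorry, I didn't understand that! Try one more time! You can ask me about History of the University, Nations, Courses or Transportation. Or you can type '/help'"
--     answer_1 = "Ticket to Stockholm is 120 SEK"
--     answer_2 = "The monthly subscription for UL card is 550 SEK."
--     answer_3 = "Arlanda airport is 27.21 kilometers"
--     answer_4 = "Bus no. 4 and Bus no. 21 comes from Uppsala Central Station to Polacksbacken"
--     answer_5 = "There are student discounts available for Transportation cards."
--
--     # COMPARE COUNTER AND SEND TO RIGHT CLUSTER
--     if (matches_q1 >= 2):
--         info = answer_1
--     elif (matches_q2 >= 2):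
--         info = answer_2
--     elif (matches_q3 >= 2):
--         info = answer_3
--     elif (matches_q4 >= 2):
--         info = answer_4
--     elif (matches_q5 >= 2):
--         info = answer_5
--     else:
--         return error_message
--
--     return info
-- ===== SOURCE B (Python) =====
-- def ask_transport(question):
--     # One pass: build a frequency table of the question words, then score each
--     # keyword list against the table; first list scoring >= 2 wins.
--     counts = {}
--     for word in question:
--         counts[word] = counts.get(word, 0) + 1
--
--     rules = [
--         (["how", "much", "train", "trains", "stockholm", "to"],
--          "Ticket to Stockholm is 120 SEK"),
--         (["ul", "card" "how", "monthly", "subscription"],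
--          "The monthly subscription for UL card is 550 SEK."),
--         (["how", "far", "arlanda", "airport"],
--          "Arlanda airport is 27.21 kilometers"),
--         (["bus", "buses", "polacksbacken", "to"],
--          "Bus no. 4 and Bus no. 21 comes from Uppsala Central Station to Polacksbacken"),
--         (["student", "discounts", "transportation", "are"],
--          "There are student discounts available for Transportation cards."),
--     ]
--
--     for keywords, answer in rules:
--         if sum(counts.get(k, 0) for k in keywords) >= 2:
--             return answer
--
--     return "Sorry, I didn't understand that! Try one more time! You can ask me about History of the University, Nations, Courses or Transportation. Or you can type '/help'"
-- ===== Notes on version B (the rewrite author's own statement) =====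
-- stated objective: faster
-- what changed: B builds a word-frequency dict of the question in one pass and scores each keyword list against that table in a data-driven (keywords, answer) rule loop, instead of A's five per-word inner keyword scans and hard-coded elif chain (the accidental 'card' 'how' concatenation in keywords_q2 is kept).
import Mathlib
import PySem

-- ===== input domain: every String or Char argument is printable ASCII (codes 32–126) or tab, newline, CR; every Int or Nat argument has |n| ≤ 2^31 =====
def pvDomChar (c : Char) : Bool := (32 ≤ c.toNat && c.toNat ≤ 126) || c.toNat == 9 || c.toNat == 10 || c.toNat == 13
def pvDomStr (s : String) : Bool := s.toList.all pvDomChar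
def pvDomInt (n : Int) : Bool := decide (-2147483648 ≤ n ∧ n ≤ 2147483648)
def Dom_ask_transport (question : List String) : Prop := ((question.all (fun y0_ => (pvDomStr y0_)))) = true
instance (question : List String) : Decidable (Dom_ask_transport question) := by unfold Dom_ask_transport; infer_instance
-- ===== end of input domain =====

-- B replaces A's five per-word inner keyword scans and hard-coded elif chain by a one-pass
-- word-frequency dict scored against a data-driven (keywords, answer) rule list (objective: faster, measured).


-- ===== PORT A =====
def kwA1 : List String := ["how", "much", "train", "trains", "stockholm", "to"]
def kwA2 : List String := ["ul", "cardhow", "monthly", "subscription"]   -- "card" "how" concatenates in Python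
def kwA3 : List String := ["how", "far", "arlanda", "airport"]
def kwA4 : List String := ["bus", "buses", "polacksbacken", "to"]
def kwA5 : List String := ["student", "discounts", "transportation", "are"]

def errorMsg : String := "Sorry, I didn't understand that! Try one more time! You can ask me about History of the University, Nations, Courses or Transportation. Or you can type '/help'"
def answer1 : String := "Ticket to Stockholm is 120 SEK"
def answer2 : String := "The monthly subscription for UL card is 550 SEK."
def answer3 : String := "Arlanda airport is 27.21 kilometers"
def answer4 : String := "Bus no. 4 and Bus no. 21 comes from Uppsala Central Station to Polacksbacken"
def answer5 : String := "There are student discounts available for Transportation cards."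

-- one inner 'for key in keywords_qi: if word == key: matches += 1' loop
def keyScan (word : String) (keys : List String) (m : Int) : Int :=
  keys.foldl (fun m key => if word == key then m + 1 else m) m

def ask_transport (question : List String) : String :=
  let st := question.foldl
    (fun (st : Int × Int × Int × Int × Int) word =>
      (keyScan word kwA1 st.1, keyScan word kwA2 st.2.1, keyScan word kwA3 st.2.2.1,
       keyScan word kwA4 st.2.2.2.1, keyScan word kwA5 st.2.2.2.2))
    (0, 0, 0, 0, 0)
  if st.1 ≥ 2 then answer1
  else if st.2.1 ≥ 2 then answer2
  else if st.2.2.1 ≥ 2 then answer3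
  else if st.2.2.2.1 ≥ 2 then answer4
  else if st.2.2.2.2 ≥ 2 then answer5
  else errorMsg

-- ===== PORT B =====
def rulesB : List (List String × String) :=
  [(kwA1, answer1), (kwA2, answer2), (kwA3, answer3), (kwA4, answer4), (kwA5, answer5)]

def ask_transport_alt (question : List String) : String :=
  let counts : PySem.Dict String Int :=
    question.foldl (fun d w => d.insert w (d.getD w 0 + 1)) PySem.Dict.empty
  match rulesB.find? (fun r => decide ((r.1.map (fun k => counts.getD k 0)).sum ≥ 2)) with
  | some r => r.2
  | none => errorMsg

-- ===== PRECONDITION & SPEC =====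
def Spec_ask_transport (question : List String) (out : String) : Prop := out = ask_transport_alt question
instance (question : List String) (out : String) : Decidable (Spec_ask_transport question out) := by unfold Spec_ask_transport; infer_instance

-- ===== CLAIM (what is proved, stated in full; the proofs are below) =====
def Claim_equal_ask_transport : Prop := ∀ (question : List String), Dom_ask_transport question → Spec_ask_transport question (ask_transport question)

-- ===== LEMMAS AND PROOFS =====

-- A's five counters fold independently
theorem foldl_prod5 (q : List String)
    (g1 g2 g3 g4 g5 : Int → String → Int) (a b c d e : Int) :
    q.foldl (fun (st : Int × Int × Int × Int × Int) w =>
        (g1 st.1 w, g2 st.2.1 w, g3 st.2.2.1 w, g4 st.2.2.2.1 w, g5 st.2.2.2.2 w)) (a, b, c, d, e)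
    = (q.foldl g1 a, q.foldl g2 b, q.foldl g3 c, q.foldl g4 d, q.foldl g5 e) := by
  induction q generalizing a b c d e with
  | nil => rfl
  | cons x xs ih => simp [List.foldl, ih]

-- double counting: summing keyword hits per question word equals summing question hits per keyword
theorem countP_beq_comm (a : String) (l : List String) :
    List.countP (fun x => a == x) l = l.count a := by
  rw [List.count_eq_countP]
  exact List.countP_congr (fun x _ => by by_cases h : a = x <;> simp [h, Ne.symm])

theorem count_swap (K q : List String) :
    (q.map (fun w => (K.count w : Int))).sum = (K.map (fun k => (q.count k : Int))).sum := by
  induction K with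
  | nil => simp
  | cons k ks ih =>
    have hc : ∀ w : String, ((k :: ks).count w : Int)
        = (if k == w then 1 else 0) + (ks.count w : Int) := by
      intro w
      by_cases h : k = w
      · subst h; simp [add_comm]
      · have hb : (k == w) = false := by simp [h]
        simp [List.count_cons, hb]
    simp only [hc, PySem.List.sum_map_add_int, ih, List.map_cons, List.sum_cons]
    congr 1
    rw [PySem.List.sum_map_ite_one_zero (fun w => k == w) q, countP_beq_comm]

theorem keyScan_aux (w : String) (K : List String) (m : Int) :
    keyScan w K m = m + (K.count w : Int) := by
  rw [keyScan, PySem.List.foldl_count_if (fun k => w == k) K m, countP_beq_comm]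

theorem keyScan_fold (K q : List String) (m : Int) :
    q.foldl (fun m w => keyScan w K m) m = m + (K.map (fun k => (q.count k : Int))).sum := by
  calc q.foldl (fun m w => keyScan w K m) m
      = q.foldl (fun m w => m + (K.count w : Int)) m := by
        simp only [keyScan_aux]
    _ = m + (q.map (fun w => (K.count w : Int))).sum := PySem.List.foldl_add _ _ _
    _ = m + (K.map (fun k => (q.count k : Int))).sum := by rw [count_swap]

theorem counts_getD (q : List String) (k : String) :
    (q.foldl (fun d w => d.insert w (d.getD w 0 + 1)) PySem.Dict.empty).getD k 0
    = (q.count k : Int) := by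
  simp [PySem.Dict.getD_foldl_insert_add_one]

-- ===== VERDICT (by name: the statement is the Claim_ definition above) =====
theorem ask_transport_spec : Claim_equal_ask_transport := by
  intro q _
  show ask_transport q = ask_transport_alt q
  have hA := foldl_prod5 q (fun m w => keyScan w kwA1 m) (fun m w => keyScan w kwA2 m)
    (fun m w => keyScan w kwA3 m) (fun m w => keyScan w kwA4 m) (fun m w => keyScan w kwA5 m)
    0 0 0 0 0
  simp only [keyScan_fold, zero_add] at hA
  simp only [ask_transport, ask_transport_alt, hA, counts_getD, rulesB, List.find?]
  split_ifs <;> simp [*]
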